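-- pv_equiv track=rewrite | github.com/alpha-mw/myQuant | scripts/unified/parallel_research_pipeline.py | _bundle_research_mode
-- ===== SOURCE A (Python) =====
-- from typing import Any, Callable
--
-- def _bundle_research_mode(symbol_provenance: dict[str, dict[str, Any]]) -> str:
--     if not symbol_provenance:
--         return "research_only"
--     if all(meta.get("is_synthetic") for meta in symbol_provenance.values()):
--         return "research_only"
--     if any(meta.get("is_synthetic") for meta in symbol_provenance.values()):
--         return "degraded"
--     return "production"
-- ===== SOURCE B (Python) =====
-- def _bundle_research_mode(symbol_provenance: dict) -> str:
--     flags = set()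
--     for meta in symbol_provenance.values():
--         flags.add(bool(meta.get("is_synthetic")))
--         if len(flags) == 2:
--             return "degraded"
--     return "production" if flags == {False} else "research_only"
-- ===== Notes on version B (the rewrite author's own statement) =====
-- stated objective: alternative
-- what changed: Replaces the emptiness check and two whole-collection all/any quantifier scans with a single early-exit loop that accumulates the set of distinct flag truth-values, returning 'degraded' as soon as both values are seen and dispatching on the final set ({False} -> production, {} or {True} -> research_only) otherwise.
import Mathlib
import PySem

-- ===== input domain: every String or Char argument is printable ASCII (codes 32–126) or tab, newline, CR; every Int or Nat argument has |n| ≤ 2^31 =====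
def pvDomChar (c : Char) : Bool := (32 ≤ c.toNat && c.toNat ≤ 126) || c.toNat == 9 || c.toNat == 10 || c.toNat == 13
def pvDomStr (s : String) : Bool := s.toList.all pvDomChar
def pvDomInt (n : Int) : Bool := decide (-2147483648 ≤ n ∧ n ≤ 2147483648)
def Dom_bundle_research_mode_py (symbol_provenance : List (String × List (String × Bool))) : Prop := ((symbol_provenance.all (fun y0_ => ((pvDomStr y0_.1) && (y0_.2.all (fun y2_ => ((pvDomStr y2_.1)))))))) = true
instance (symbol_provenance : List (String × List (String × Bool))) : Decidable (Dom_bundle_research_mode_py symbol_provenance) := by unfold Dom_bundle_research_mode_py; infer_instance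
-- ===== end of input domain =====

-- B replaces the emptiness check and the two all/any quantifier scans with a single early-exit
-- loop accumulating the set of distinct flag truth-values (objective: alternative, same cost).
-- ===== PORT A =====
-- meta.get("is_synthetic") truthiness: missing key (None) and False are both falsy
def pvSynthFlag (m : List (String × Bool)) : Bool :=
  ((PySem.Dict.ofList m).get? "is_synthetic").getD false

def bundle_research_mode_py (symbol_provenance : List (String × List (String × Bool))) : String :=
  let vals := (PySem.Dict.ofList symbol_provenance).values
  if vals.isEmpty then "research_only"
  else if vals.all pvSynthFlag then "research_only"
  else if vals.any pvSynthFlag then "degraded"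
  else "production"

-- ===== PORT B =====
-- the early-exit loop of Source B: flags is the set of distinct flag values seen so far
def pvFlagLoop : List (List (String × Bool)) → PySem.Set Bool → String
  | [], flags => if PySem.Set.equal flags (PySem.Set.ofList [false]) then "production" else "research_only"
  | m :: rest, flags =>
      let flags' := PySem.Set.add flags (pvSynthFlag m)
      if PySem.Set.len flags' = 2 then "degraded" else pvFlagLoop rest flags'

def bundle_research_mode_py_alt (symbol_provenance : List (String × List (String × Bool))) : String :=
  pvFlagLoop ((PySem.Dict.ofList symbol_provenance).values) PySem.Set.empty

-- ===== PRECONDITION & SPEC =====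
def Spec_bundle_research_mode_py (symbol_provenance : List (String × List (String × Bool))) (out : String) : Prop := out = bundle_research_mode_py_alt symbol_provenance
instance (symbol_provenance : List (String × List (String × Bool))) (out : String) : Decidable (Spec_bundle_research_mode_py symbol_provenance out) := by unfold Spec_bundle_research_mode_py; infer_instance

-- ===== CLAIM (what is proved, stated in full; the proofs are below) =====
def Claim_equal_bundle_research_mode_py : Prop := ∀ (symbol_provenance : List (String × List (String × Bool))), Dom_bundle_research_mode_py symbol_provenance → Spec_bundle_research_mode_py symbol_provenance (bundle_research_mode_py symbol_provenance)

-- ===== LEMMAS AND PROOFS =====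
-- characterization of the loop from each of its three reachable states
lemma pvFlagLoop_spec : ∀ (vals : List (List (String × Bool))),
    (pvFlagLoop vals [] =
      (if vals.all pvSynthFlag then "research_only"
       else if vals.any pvSynthFlag then "degraded" else "production"))
    ∧ (pvFlagLoop vals [true] =
      (if vals.all pvSynthFlag then "research_only" else "degraded"))
    ∧ (pvFlagLoop vals [false] =
      (if vals.any pvSynthFlag then "degraded" else "production")) := by
  intro vals
  induction vals with
  | nil => refine ⟨by decide, by decide, by decide⟩
  | cons m rest ih =>
      obtain ⟨ih0, ihT, ihF⟩ := ih
      cases hp : pvSynthFlag m <;>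
        simp [pvFlagLoop, PySem.Set.add, PySem.Set.len, hp, ihT, ihF,
              List.all_cons, List.any_cons]

theorem bundle_research_mode_py_spec : Claim_equal_bundle_research_mode_py := by
  intro sp _
  unfold Spec_bundle_research_mode_py bundle_research_mode_py bundle_research_mode_py_alt
  obtain ⟨h0, _, _⟩ := pvFlagLoop_spec ((PySem.Dict.ofList sp).values)
  simp only [PySem.Set.empty, h0]
  cases (PySem.Dict.ofList sp).values with
  | nil => simp
  | cons v vs => simp
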